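-- pv_equiv track=rewrite | github.com/dqk0902/DSA_2025 | week4/roboroute.py | analyze_route
-- ===== SOURCE A (Python) =====
-- def analyze_route(grid):
--     start_row, start_col = None, None
--     for r, row in enumerate(grid):
--         for c, cell in enumerate(row):
--             if cell == 'R':
--                 start_row, start_col = r, c
--                 break
--         if start_row is not None:
--             break
--
--     directions = [(-1, 0), (0, 1), (1, 0), (0, -1)]
--     current_dir = 0
--
--     rows, cols = len(grid), len(grid[0])
--     visited = {(start_row, start_col)}
--
--     row, col = start_row, start_col
--
--     state_history = {(row, col, current_dir)}
--
--     while True: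
--         dr, dc = directions[current_dir]
--         next_row, next_col = row + dr, col + dc
--
--         if next_row < 0 or next_row >= rows or next_col < 0 or next_col >= cols:
--             return (len(visited), True)
--
--         if grid[next_row][next_col] == '#':
--             current_dir = (current_dir + 1) % 4
--             state = (row, col, current_dir)
--             if state in state_history:
--                 return (len(visited), False)
--             state_history.add(state)
--         else:
--             row, col = next_row, next_col
--             visited.add((row, col))
--
--             state = (row, col, current_dir)
--             if state in state_history:
--                 return (len(visited), False)
--             state_history.add(state)
-- ===== SOURCE B (Python) =====
-- def analyze_route(grid):
--     rows, cols = len(grid), len(grid[0])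
--     # first 'R' in row-major order (StopIteration if absent; outside Pre_)
--     sr, sc = next((r, c) for r, row in enumerate(grid)
--                   for c, cell in enumerate(row) if cell == 'R')
--     visited = {(sr, sc)}
--     r, c, d = sr, sc, 0
--     deltas = [(-1, 0), (0, 1), (1, 0), (0, -1)]
--     # The walk is deterministic over at most 4*rows*cols distinct states
--     # (row, col, dir); if it has not left the grid after that many steps it
--     # is in a cycle and the visited set can no longer grow.
--     for _ in range(4 * rows * cols):
--         dr, dc = deltas[d]
--         nr, nc = r + dr, c + dc
--         if nr < 0 or nr >= rows or nc < 0 or nc >= cols: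
--             return (len(visited), True)
--         if grid[nr][nc] == '#':
--             d = (d + 1) % 4
--         else:
--             r, c = nr, nc
--             visited.add((r, c))
--     return (len(visited), False)
-- ===== Notes on version B (the rewrite author's own statement) =====
-- stated objective: alternative
-- what changed: B drops A's state-history set entirely: it bounds the simulation at 4*rows*cols iterations (the size of the (row,col,dir) state space), after which the deterministic walk is provably cycling and the visited set can no longer grow, and it finds the start with a single flattened generator scan instead of A's nested break-loops; Pre_ excludes grids without an 'R' (A raises TypeError), the empty grid (IndexError) and ragged grids, on which A's survival depends on the accidental path and it may raise IndexError mid-walk.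
-- outside the precondition, e.g. on analyze_route([[], ['R']]): A returns (1, True), B returns (1, False); on analyze_route([['x', 'y'], ['R']]): A returns (2, True), B returns (2, True); on analyze_route([['#', '#'], ['R']]): A raises IndexError, B raises IndexError
import Mathlib
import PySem

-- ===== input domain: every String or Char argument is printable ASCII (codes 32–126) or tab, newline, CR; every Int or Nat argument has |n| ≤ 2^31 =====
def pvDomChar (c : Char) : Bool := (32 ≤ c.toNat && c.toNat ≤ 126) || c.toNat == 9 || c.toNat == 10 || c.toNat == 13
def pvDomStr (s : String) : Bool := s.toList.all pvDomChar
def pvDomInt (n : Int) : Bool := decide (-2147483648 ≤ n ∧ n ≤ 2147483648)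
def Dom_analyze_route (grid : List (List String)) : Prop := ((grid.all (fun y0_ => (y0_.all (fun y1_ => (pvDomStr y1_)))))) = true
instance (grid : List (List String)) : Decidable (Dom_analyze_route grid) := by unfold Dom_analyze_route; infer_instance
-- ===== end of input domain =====

-- B replaces A's state-history set by a step-count bound (4*rows*cols iterations
-- suffice: after that many steps the deterministic walk must be cycling and the
-- visited set can no longer grow), so B keeps no loop-detection set at all.

-- ===== PORT A =====

-- directions = [(-1, 0), (0, 1), (1, 0), (0, -1)]
def pvDirsA : List (Int × Int) := [(-1, 0), (0, 1), (1, 0), (0, -1)]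

-- inner 'for c, cell in enumerate(row): if cell == "R": … break'
def pvScanRowA : List (Int × String) → Option Int
  | [] => none
  | (c, cell) :: rest => if cell == "R" then some c else pvScanRowA rest

-- outer 'for r, row in enumerate(grid): …; if start_row is not None: break'
def pvScanA : List (Int × List String) → Option (Int × Int)
  | [] => none
  | (r, row) :: rest =>
    match pvScanRowA (PySem.List.enumerate row) with
    | some c => some (r, c)
    | none => pvScanA rest

-- 'while True: …' — fuel-guarded (fuel is only a totality guard; the proof shows
-- (rows*cols*4).toNat + 1 units are never exhausted under Pre_)
def pvLoopA (grid : List (List String)) (rows cols : Int) :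
    Nat → Int → Int → Int → PySem.Set (Int × Int) → PySem.Set (Int × Int × Int) → Int × Bool
  | 0, _, _, _, visited, _ => (PySem.Set.len visited, false)
  | fuel+1, row, col, d, visited, hist =>
    let dd := PySem.List.pyGetD pvDirsA d ((0 : Int), (0 : Int))
    let nr := row + dd.1
    let nc := col + dd.2
    if nr < 0 ∨ nr ≥ rows ∨ nc < 0 ∨ nc ≥ cols then (PySem.Set.len visited, true)
    else if PySem.List.pyGetD (PySem.List.pyGetD grid nr []) nc "" == "#" then
      let d' := PySem.Int.mod (d + 1) 4
      if (row, col, d') ∈ hist then (PySem.Set.len visited, false)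
      else pvLoopA grid rows cols fuel row col d' visited (PySem.Set.add hist (row, col, d'))
    else
      let visited' := PySem.Set.add visited (nr, nc)
      if (nr, nc, d) ∈ hist then (PySem.Set.len visited', false)
      else pvLoopA grid rows cols fuel nr nc d visited' (PySem.Set.add hist (nr, nc, d))

def analyze_route (grid : List (List String)) : Int × Bool :=
  match pvScanA (PySem.List.enumerate grid) with
  | none => (0, false)   -- Python: start_row is None, 'None + dr' raises TypeError (outside Pre_)
  | some (sr, sc) =>
    let rows : Int := PySem.List.len grid
    let cols : Int := PySem.List.len (PySem.List.pyGetD grid 0 [])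
    pvLoopA grid rows cols ((rows * cols * 4).toNat + 1) sr sc 0
      (PySem.Set.ofList [(sr, sc)]) (PySem.Set.ofList [(sr, sc, (0 : Int))])

-- ===== PORT B =====

def pvDeltasB : List (Int × Int) := [(-1, 0), (0, 1), (1, 0), (0, -1)]

-- next((r, c) for r, row in enumerate(grid) for c, cell in enumerate(row) if cell == 'R')
def pvScanB (grid : List (List String)) : Option (Int × Int) :=
  ((PySem.List.enumerate grid).flatMap (fun p =>
    (PySem.List.enumerate p.2).filterMap (fun q =>
      if q.2 == "R" then some (p.1, q.1) else none))).head?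

-- 'for _ in range(4 * rows * cols): …' with the trailing 'return (len(visited), False)'
def pvLoopB (grid : List (List String)) (rows cols : Int) :
    Nat → Int → Int → Int → PySem.Set (Int × Int) → Int × Bool
  | 0, _, _, _, visited => (PySem.Set.len visited, false)
  | n+1, r, c, d, visited =>
    let dd := PySem.List.pyGetD pvDeltasB d ((0 : Int), (0 : Int))
    let nr := r + dd.1
    let nc := c + dd.2
    if nr < 0 ∨ nr ≥ rows ∨ nc < 0 ∨ nc ≥ cols then (PySem.Set.len visited, true)
    else if PySem.List.pyGetD (PySem.List.pyGetD grid nr []) nc "" == "#" then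
      pvLoopB grid rows cols n r c (PySem.Int.mod (d + 1) 4) visited
    else
      pvLoopB grid rows cols n nr nc d (PySem.Set.add visited (nr, nc))

def analyze_route_alt (grid : List (List String)) : Int × Bool :=
  let rows : Int := PySem.List.len grid
  let cols : Int := PySem.List.len (PySem.List.pyGetD grid 0 [])
  match pvScanB grid with
  | none => (0, false)   -- Python: next(…) raises StopIteration (outside Pre_)
  | some (sr, sc) =>
    pvLoopB grid rows cols (rows * cols * 4).toNat sr sc 0 (PySem.Set.ofList [(sr, sc)])

-- ===== PRECONDITION & SPEC =====
-- Pre_ excludes: grids without an 'R' cell (A raises TypeError), the empty grid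
-- (IndexError on grid[0]), and ragged grids (cols is read off row 0, so stepping
-- into a shorter row can raise IndexError mid-walk depending on the path; the
-- rectangularity condition below conservatively excludes all ragged grids, some
-- of which A does finish on — see the cites).
def Pre_analyze_route (grid : List (List String)) : Prop :=
  grid ≠ [] ∧ (∀ row ∈ grid, row.length = grid.headI.length) ∧ (∃ row ∈ grid, "R" ∈ row)
instance (grid : List (List String)) : Decidable (Pre_analyze_route grid) := by
  unfold Pre_analyze_route; infer_instance

def pvWitness_analyze_route : List (List String) := [[".", "R"], ["#", "."]]

def Spec_analyze_route (grid : List (List String)) (out : Int × Bool) : Prop := out = analyze_route_alt grid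
instance (grid : List (List String)) (out : Int × Bool) : Decidable (Spec_analyze_route grid out) := by
  unfold Spec_analyze_route; infer_instance

-- ===== CLAIM (what is proved, stated in full; the proofs are below) =====
def Claim_equal_analyze_route : Prop := ∀ (grid : List (List String)), Dom_analyze_route grid → Pre_analyze_route grid → Spec_analyze_route grid (analyze_route grid)

-- ===== LEMMAS AND PROOFS =====

-- one deterministic step of the walk (none = the robot leaves the grid)
def pvStep (grid : List (List String)) (rows cols : Int) (s : Int × Int × Int) :
    Option (Int × Int × Int) :=
  let dd := PySem.List.pyGetD pvDirsA s.2.2 ((0 : Int), (0 : Int))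
  let nr := s.1 + dd.1
  let nc := s.2.1 + dd.2
  if nr < 0 ∨ nr ≥ rows ∨ nc < 0 ∨ nc ≥ cols then none
  else if PySem.List.pyGetD (PySem.List.pyGetD grid nr []) nc "" == "#" then
    some (s.1, s.2.1, PySem.Int.mod (s.2.2 + 1) 4)
  else some (nr, nc, s.2.2)

-- A's scan and B's scan find the same first 'R' (row-major)
theorem pvScanRowA_eq (cells : List (Int × String)) :
    pvScanRowA cells = (cells.filterMap (fun q => if q.2 == "R" then some q.1 else none)).head? := by
  induction cells with
  | nil => rfl
  | cons q rest ih =>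
    obtain ⟨c, cell⟩ := q
    by_cases h : cell = "R" <;> simp [pvScanRowA, h, ih]

theorem pvScanA_eq (l : List (Int × List String)) :
    pvScanA l = (l.flatMap (fun p =>
      (PySem.List.enumerate p.2).filterMap (fun q =>
        if q.2 == "R" then some (p.1, q.1) else none))).head? := by
  induction l with
  | nil => rfl
  | cons p rest ih =>
    obtain ⟨r, row⟩ := p
    have hfun : (fun q : Int × String => if (q.2 == "R") = true then some (r, q.1) else none)
        = fun q => (if (q.2 == "R") = true then some q.1 else none).map (fun c => (r, c)) := by
      funext q; by_cases h : q.2 = "R" <;> simp [h]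
    simp only [List.flatMap_cons, List.head?_append, hfun, ← List.map_filterMap, List.head?_map]
    simp only [pvScanA, pvScanRowA_eq, ih]
    cases hh : (List.filterMap (fun q => if (q.2 == "R") = true then some q.1 else none) (PySem.List.enumerate row)).head? <;>
      simp [Option.or]

theorem pvScans_eq (grid : List (List String)) :
    pvScanA (PySem.List.enumerate grid) = pvScanB grid := by
  rw [pvScanA_eq, pvScanB]

-- membership in the bounded state space
def pvInSpace (rows cols : Int) (s : Int × Int × Int) : Prop :=
  0 ≤ s.1 ∧ s.1 < rows ∧ 0 ≤ s.2.1 ∧ s.2.1 < cols ∧ 0 ≤ s.2.2 ∧ s.2.2 < 4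

theorem pvSpace_card (R C : Nat) (hist : List (Int × Int × Int)) (hnd : hist.Nodup)
    (hin : ∀ s ∈ hist, pvInSpace (R : Int) (C : Int) s) :
    hist.length ≤ R * C * 4 := by
  classical
  have hsub : hist.toFinset ⊆ (Finset.Ico (0 : Int) R) ×ˢ ((Finset.Ico (0 : Int) C) ×ˢ (Finset.Ico (0 : Int) 4)) := by
    intro s hs
    rw [List.mem_toFinset] at hs
    obtain ⟨h1, h2, h3, h4, h5, h6⟩ := hin s hs
    simp [Finset.mem_product, Finset.mem_Ico]
    exact ⟨⟨h1, h2⟩, ⟨h3, h4⟩, h5, h6⟩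
  have := Finset.card_le_card hsub
  rw [List.toFinset_card_of_nodup hnd] at this
  simpa [Finset.card_product, Int.toNat_natCast, Nat.mul_assoc] using this

-- once every reachable state sits in a closed set H whose cells are all visited,
-- B's loop can only return (len visited, False)
theorem pvLoopB_cycle (grid : List (List String)) (rows cols : Int)
    (H : List (Int × Int × Int)) (vis : PySem.Set (Int × Int))
    (hclosed : ∀ s ∈ H, ∃ s', pvStep grid rows cols s = some s' ∧ s' ∈ H)
    (hcells : ∀ s ∈ H, (s.1, s.2.1) ∈ vis) :
    ∀ (n : Nat) (r c d : Int), (r, c, d) ∈ H →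
      pvLoopB grid rows cols n r c d vis = (PySem.Set.len vis, false) := by
  intro n
  induction n with
  | zero => intro r c d _; rfl
  | succ n ih =>
    intro r c d hmem
    obtain ⟨s', hstep, hs'⟩ := hclosed _ hmem
    rw [pvLoopB]
    simp only [pvStep] at hstep
    by_cases hoob : r + (PySem.List.pyGetD pvDirsA d ((0:Int),(0:Int))).1 < 0 ∨
        r + (PySem.List.pyGetD pvDirsA d ((0:Int),(0:Int))).1 ≥ rows ∨
        c + (PySem.List.pyGetD pvDirsA d ((0:Int),(0:Int))).2 < 0 ∨
        c + (PySem.List.pyGetD pvDirsA d ((0:Int),(0:Int))).2 ≥ cols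
    · simp only [hoob, if_true] at hstep; exact absurd hstep (by simp)
    · simp only [hoob, if_false] at hstep
      rw [show pvDeltasB = pvDirsA from rfl]
      simp only [if_neg hoob]
      by_cases hwall : PySem.List.pyGetD (PySem.List.pyGetD grid (r + (PySem.List.pyGetD pvDirsA d ((0:Int),(0:Int))).1) [])
          (c + (PySem.List.pyGetD pvDirsA d ((0:Int),(0:Int))).2) "" == "#"
      · simp only [hwall, if_true] at hstep ⊢
        cases hstep
        exact ih r c (PySem.Int.mod (d + 1) 4) hs'
      · simp only [hwall] at hstep ⊢
        cases hstep
        have : PySem.Set.add vis (r + (PySem.List.pyGetD pvDirsA d ((0:Int),(0:Int))).1,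
            c + (PySem.List.pyGetD pvDirsA d ((0:Int),(0:Int))).2) = vis :=
          PySem.Set.add_of_mem (hcells _ hs')
        rw [this]
        exact ih _ _ _ hs'

-- main lockstep induction: with the history invariant, A's fuelled loop and
-- B's counted loop agree
theorem pvLoopAB (grid : List (List String)) (R C : Nat) :
    ∀ (n : Nat) (row col d : Int) (vis : PySem.Set (Int × Int)) (hist : PySem.Set (Int × Int × Int)),
      (row, col, d) ∈ hist →
      hist.Nodup →
      (∀ s ∈ hist, pvInSpace (R : Int) (C : Int) s) →
      (∀ s ∈ hist, (s.1, s.2.1) ∈ vis) →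
      (∀ s ∈ hist, s ≠ (row, col, d) →
        ∃ s', pvStep grid (R : Int) (C : Int) s = some s' ∧ s' ∈ hist) →
      hist.length + n = R * C * 4 + 1 →
      pvLoopA grid (R : Int) (C : Int) (n + 1) row col d vis hist =
        pvLoopB grid (R : Int) (C : Int) n row col d vis := by
  intro n
  induction n with
  | zero =>
    intro row col d vis hist hmem hnd hspace hcells hclosed hlen
    exact absurd (pvSpace_card R C hist hnd hspace) (by omega)
  | succ n ih =>
    intro row col d vis hist hmem hnd hspace hcells hclosed hlen
    rw [pvLoopA, pvLoopB]
    rw [show pvDeltasB = pvDirsA from rfl]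
    by_cases hoob : row + (PySem.List.pyGetD pvDirsA d ((0:Int),(0:Int))).1 < 0 ∨
        row + (PySem.List.pyGetD pvDirsA d ((0:Int),(0:Int))).1 ≥ (R : Int) ∨
        col + (PySem.List.pyGetD pvDirsA d ((0:Int),(0:Int))).2 < 0 ∨
        col + (PySem.List.pyGetD pvDirsA d ((0:Int),(0:Int))).2 ≥ (C : Int)
    · simp only [if_pos hoob]
    · simp only [if_neg hoob]
      by_cases hwall : (PySem.List.pyGetD (PySem.List.pyGetD grid
            (row + (PySem.List.pyGetD pvDirsA d ((0:Int),(0:Int))).1) [])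
            (col + (PySem.List.pyGetD pvDirsA d ((0:Int),(0:Int))).2) "" == "#") = true
      · -- wall ahead: turn right
        simp only [if_pos hwall]
        have hstepcur : pvStep grid (R : Int) (C : Int) (row, col, d)
            = some (row, col, PySem.Int.mod (d + 1) 4) := by
          simp only [pvStep, if_neg hoob, if_pos hwall]
        by_cases hmem' : (row, col, PySem.Int.mod (d + 1) 4) ∈ hist
        · simp only [if_pos hmem']
          refine (pvLoopB_cycle grid (R : Int) (C : Int) hist vis ?_ hcells n _ _ _ hmem').symm
          intro s hs
          by_cases hcur : s = (row, col, d)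
          · exact ⟨_, hcur ▸ hstepcur, hmem'⟩
          · exact hclosed s hs hcur
        · simp only [if_neg hmem']
          have hadd : PySem.Set.add hist (row, col, PySem.Int.mod (d + 1) 4)
              = hist ++ [(row, col, PySem.Int.mod (d + 1) 4)] := PySem.Set.add_of_not_mem hmem'
          apply ih
          · exact (PySem.Set.mem_add hist _ _).2 (Or.inr rfl)
          · exact PySem.Set.nodup_add hist _ hnd
          · intro s hs
            rcases (PySem.Set.mem_add hist _ s).1 hs with h | h
            · exact hspace s h
            · subst h
              obtain ⟨h1, h2, h3, h4, _, _⟩ := hspace _ hmem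
              exact ⟨h1, h2, h3, h4, PySem.Int.mod_nonneg _ (by norm_num),
                PySem.Int.mod_lt _ (by norm_num)⟩
          · intro s hs
            rcases (PySem.Set.mem_add hist _ s).1 hs with h | h
            · exact hcells s h
            · subst h; exact hcells (row, col, d) hmem
          · intro s hs hne
            rcases (PySem.Set.mem_add hist _ s).1 hs with h | h
            · by_cases hcur : s = (row, col, d)
              · exact ⟨_, hcur ▸ hstepcur, (PySem.Set.mem_add hist _ _).2 (Or.inr rfl)⟩
              · obtain ⟨s', h1, h2⟩ := hclosed s h hcur
                exact ⟨s', h1, (PySem.Set.mem_add hist _ _).2 (Or.inl h2)⟩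
            · exact absurd h hne
          · rw [hadd]; simp only [List.length_append, List.length_singleton]; omega
      · -- free cell ahead: move
        simp only [if_neg hwall]
        have hstepcur : pvStep grid (R : Int) (C : Int) (row, col, d)
            = some (row + (PySem.List.pyGetD pvDirsA d ((0:Int),(0:Int))).1,
                col + (PySem.List.pyGetD pvDirsA d ((0:Int),(0:Int))).2, d) := by
          simp only [pvStep, if_neg hoob, if_neg hwall]
        by_cases hmem' : (row + (PySem.List.pyGetD pvDirsA d ((0:Int),(0:Int))).1,
            col + (PySem.List.pyGetD pvDirsA d ((0:Int),(0:Int))).2, d) ∈ hist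
        · simp only [if_pos hmem']
          have hviseq : PySem.Set.add vis (row + (PySem.List.pyGetD pvDirsA d ((0:Int),(0:Int))).1,
              col + (PySem.List.pyGetD pvDirsA d ((0:Int),(0:Int))).2) = vis :=
            PySem.Set.add_of_mem (hcells _ hmem')
          rw [hviseq]
          refine (pvLoopB_cycle grid (R : Int) (C : Int) hist vis ?_ hcells n _ _ _ hmem').symm
          intro s hs
          by_cases hcur : s = (row, col, d)
          · exact ⟨_, hcur ▸ hstepcur, hmem'⟩
          · exact hclosed s hs hcur
        · simp only [if_neg hmem']
          have hadd : PySem.Set.add hist (row + (PySem.List.pyGetD pvDirsA d ((0:Int),(0:Int))).1,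
              col + (PySem.List.pyGetD pvDirsA d ((0:Int),(0:Int))).2, d)
              = hist ++ [(row + (PySem.List.pyGetD pvDirsA d ((0:Int),(0:Int))).1,
                col + (PySem.List.pyGetD pvDirsA d ((0:Int),(0:Int))).2, d)] :=
            PySem.Set.add_of_not_mem hmem'
          apply ih
          · exact (PySem.Set.mem_add hist _ _).2 (Or.inr rfl)
          · exact PySem.Set.nodup_add hist _ hnd
          · intro s hs
            rcases (PySem.Set.mem_add hist _ s).1 hs with h | h
            · exact hspace s h
            · subst h
              obtain ⟨_, _, _, _, h5, h6⟩ := hspace _ hmem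
              simp only [not_or, not_lt, ge_iff_le, not_le] at hoob
              exact ⟨hoob.1, hoob.2.1, hoob.2.2.1, hoob.2.2.2, h5, h6⟩
          · intro s hs
            rcases (PySem.Set.mem_add hist _ s).1 hs with h | h
            · exact (PySem.Set.mem_add vis _ _).2 (Or.inl (hcells s h))
            · subst h; exact (PySem.Set.mem_add vis _ _).2 (Or.inr rfl)
          · intro s hs hne
            rcases (PySem.Set.mem_add hist _ s).1 hs with h | h
            · by_cases hcur : s = (row, col, d)
              · exact ⟨_, hcur ▸ hstepcur, (PySem.Set.mem_add hist _ _).2 (Or.inr rfl)⟩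
              · obtain ⟨s', h1, h2⟩ := hclosed s h hcur
                exact ⟨s', h1, (PySem.Set.mem_add hist _ _).2 (Or.inl h2)⟩
            · exact absurd h hne
          · rw [hadd]; simp only [List.length_append, List.length_singleton]; omega

-- ===== VERDICT (by name: the statement is the Claim_ definition above) =====
theorem analyze_route_spec : Claim_equal_analyze_route := by
  intro grid _hdom hpre
  obtain ⟨hne, hrect, hR⟩ := hpre
  unfold Spec_analyze_route
  cases grid with
  | nil => exact absurd rfl hne
  | cons g0 gt =>
    have hrect' : ∀ row ∈ g0 :: gt, row.length = g0.length := by simpa using hrect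
    have hnonnil : ((PySem.List.enumerate (g0 :: gt)).flatMap (fun p =>
        (PySem.List.enumerate p.2).filterMap (fun q =>
          if q.2 == "R" then some (p.1, q.1) else none))) ≠ [] := by
      obtain ⟨row, hrow, hRr⟩ := hR
      obtain ⟨k, hk, hgk⟩ := List.mem_iff_getElem.1 hrow
      obtain ⟨j, hj, hgj⟩ := List.mem_iff_getElem.1 hRr
      intro hnil
      have hmem : (((0:Int) + (k : Int), (0:Int) + (j : Int)) : Int × Int) ∈
          ((PySem.List.enumerate (g0 :: gt)).flatMap (fun p =>
            (PySem.List.enumerate p.2).filterMap (fun q =>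
              if q.2 == "R" then some (p.1, q.1) else none))) := by
        refine List.mem_flatMap.2 ⟨((0:Int) + (k : Int), (g0 :: gt)[k]), ?_, ?_⟩
        · exact (PySem.List.mem_enumerate_iff _ _ _).2 ⟨k, hk, rfl⟩
        · refine List.mem_filterMap.2 ⟨((0:Int) + (j : Int), row[j]), ?_, ?_⟩
          · simp only [hgk]
            exact (PySem.List.mem_enumerate_iff _ _ _).2 ⟨j, hj, rfl⟩
          · simp [hgj]
      rw [hnil] at hmem
      exact absurd hmem (List.not_mem_nil)
    cases hh : pvScanB (g0 :: gt) with
    | none =>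
      rw [pvScanB] at hh
      exact absurd (List.head?_eq_none_iff.1 hh) hnonnil
    | some pr =>
      obtain ⟨sr, sc⟩ := pr
      have hmemL : ((sr, sc) : Int × Int) ∈
          ((PySem.List.enumerate (g0 :: gt)).flatMap (fun p =>
            (PySem.List.enumerate p.2).filterMap (fun q =>
              if q.2 == "R" then some (p.1, q.1) else none))) := by
        rw [pvScanB] at hh
        obtain ⟨t, ht⟩ := List.head?_eq_some_iff.1 hh
        rw [ht]; simp
      obtain ⟨p, hp, hq⟩ := List.mem_flatMap.1 hmemL
      obtain ⟨k, hk, rfl⟩ := (PySem.List.mem_enumerate_iff _ _ _).1 hp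
      obtain ⟨q, hq', heq⟩ := List.mem_filterMap.1 hq
      obtain ⟨j, hj, rfl⟩ := (PySem.List.mem_enumerate_iff _ _ _).1 hq'
      by_cases hRcell : (((g0 :: gt)[k][j] == "R") = true)
      case neg => simp [hRcell] at heq
      simp only [hRcell, if_pos, Option.some.injEq, Prod.mk.injEq, zero_add] at heq
      obtain ⟨hsr, hsc⟩ := heq
      have hjC : j < g0.length := by
        rw [← hrect' ((g0 :: gt)[k]) (List.getElem_mem hk)]; exact hj
      have hfuel : (((g0 :: gt).length : Int) * (g0.length : Int) * 4).toNat
          = (g0 :: gt).length * g0.length * 4 := by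
        rw [show (((g0 :: gt).length : Int) * (g0.length : Int) * 4)
            = (((g0 :: gt).length * g0.length * 4 : Nat) : Int) by push_cast; ring,
          Int.toNat_natCast]
      simp only [analyze_route, analyze_route_alt, pvScans_eq, hh,
        PySem.List.len_eq, PySem.List.pyGetD_zero_cons, hfuel]
      rw [show PySem.Set.ofList [((sr, sc) : Int × Int)] = [(sr, sc)] from rfl,
        show PySem.Set.ofList [((sr, sc, (0:Int)) : Int × Int × Int)] = [(sr, sc, 0)] from rfl]
      refine pvLoopAB (g0 :: gt) (g0 :: gt).length g0.length
        ((g0 :: gt).length * g0.length * 4) sr sc 0 [(sr, sc)] [(sr, sc, 0)]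
        ?_ ?_ ?_ ?_ ?_ ?_
      · simp
      · exact List.nodup_singleton _
      · intro s hs
        rw [List.mem_singleton] at hs
        subst hs
        refine ⟨?_, ?_, ?_, ?_, le_refl 0, by norm_num⟩
        · show (0:Int) ≤ sr; rw [← hsr]; exact Int.natCast_nonneg k
        · show sr < ((g0 :: gt).length : Int); rw [← hsr]; exact_mod_cast hk
        · show (0:Int) ≤ sc; rw [← hsc]; exact Int.natCast_nonneg j
        · show sc < (g0.length : Int); rw [← hsc]; exact_mod_cast hjC
      · intro s hs
        rw [List.mem_singleton] at hs
        subst hs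
        simp
      · intro s hs hne
        rw [List.mem_singleton] at hs
        exact absurd hs hne
      · simp only [List.length_singleton]; omega
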